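-- pv_equiv track=rewrite | github.com/s3rvac/advent-of-code | 2023/02/aoc02_part2.py | get_power_of_game
-- ===== SOURCE A (Python) =====
-- def get_power_of_game(game):
--     min_cubes = {
--         'red': 0,
--         'green': 0,
--         'blue': 0,
--     }
--     for set in game['sets']:
--         for color, count in set:
--             if min_cubes[color] < count:
--                 min_cubes[color] = count
--
--     return min_cubes['red'] * min_cubes['green'] * min_cubes['blue']
-- ===== SOURCE B (Python) =====
-- def get_power_of_game(game):
--     pairs = [pair for cube_set in game['sets'] for pair in cube_set]
--     need = {
--         color: max([0] + [count for c, count in pairs if c == color])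
--         for color in ('red', 'green', 'blue')
--     }
--     return need['red'] * need['green'] * need['blue']
-- ===== Notes on version B (the rewrite author's own statement) =====
-- stated objective: idiomatic
-- what changed: Replaces the fused nested loop mutating a running dict with a flatten of all (color,count) pairs followed by three independent 0-seeded max() computations built in a dict comprehension.
import Mathlib
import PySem

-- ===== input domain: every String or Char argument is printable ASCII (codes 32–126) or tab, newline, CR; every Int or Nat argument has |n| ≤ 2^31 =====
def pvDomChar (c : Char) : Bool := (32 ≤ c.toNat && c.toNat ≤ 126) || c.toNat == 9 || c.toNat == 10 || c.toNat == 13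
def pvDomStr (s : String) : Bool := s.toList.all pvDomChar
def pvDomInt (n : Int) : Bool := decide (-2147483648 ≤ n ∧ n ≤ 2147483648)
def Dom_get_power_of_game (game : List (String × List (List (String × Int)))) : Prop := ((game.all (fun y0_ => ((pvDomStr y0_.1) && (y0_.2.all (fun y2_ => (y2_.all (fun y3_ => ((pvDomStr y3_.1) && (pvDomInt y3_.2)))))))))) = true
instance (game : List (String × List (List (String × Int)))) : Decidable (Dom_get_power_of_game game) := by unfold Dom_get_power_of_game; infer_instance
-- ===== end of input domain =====

-- B replaces A's fused nested loop over a mutated running dict by flattening all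
-- (color,count) pairs and taking three independent 0-seeded maxima (idiomatic decomposition).


-- ===== PORT A =====
-- one body of A's inner loop: `if min_cubes[color] < count: min_cubes[color] = count`
-- (a missing key = Python KeyError: the `none` branch is unreachable under Pre_)
def pvStepA (d : PySem.Dict String Int) (p : String × Int) : PySem.Dict String Int :=
  match d.get? p.1 with
  | none => d
  | some v => if v < p.2 then d.insert p.1 p.2 else d

def get_power_of_game (game : List (String × List (List (String × Int)))) : Int :=
  let min_cubes : PySem.Dict String Int :=
    PySem.Dict.ofList [("red", 0), ("green", 0), ("blue", 0)]
  -- game['sets'] : first-match lookup; a missing key is a KeyError, excluded by Pre_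
  match List.lookup "sets" game with
  | none => 0
  | some sets =>
    let final := sets.foldl (fun d s => s.foldl pvStepA d) min_cubes
    final.getD "red" 0 * final.getD "green" 0 * final.getD "blue" 0

-- ===== PORT B =====
def get_power_of_game_alt (game : List (String × List (List (String × Int)))) : Int :=
  let sets := (List.lookup "sets" game).getD []
  let pairs := sets.flatMap id
  let need := fun (color : String) =>
    ((0 : Int) :: pairs.filterMap (fun p => if p.1 = color then some p.2 else none)).foldl max 0
  need "red" * need "green" * need "blue"

-- ===== PRECONDITION & SPEC =====
-- Pre_ excludes exactly the inputs where A raises: a game without a 'sets' key (KeyError on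
-- game['sets']) or one whose sets mention a color other than red/green/blue (KeyError on min_cubes[color]).
def Pre_get_power_of_game (game : List (String × List (List (String × Int)))) : Prop :=
  (List.lookup "sets" game).isSome ∧
  ∀ s ∈ (List.lookup "sets" game).getD [], ∀ p ∈ s,
    p.1 = "red" ∨ p.1 = "green" ∨ p.1 = "blue"
instance (game : List (String × List (List (String × Int)))) : Decidable (Pre_get_power_of_game game) := by unfold Pre_get_power_of_game; infer_instance

def pvWitness_get_power_of_game : (List (String × List (List (String × Int)))) :=
  [("sets", [[("red", 4), ("blue", 3)], [("green", 2), ("red", 1)]])]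

def Spec_get_power_of_game (game : List (String × List (List (String × Int)))) (out : Int) : Prop := out = get_power_of_game_alt game
instance (game : List (String × List (List (String × Int)))) (out : Int) : Decidable (Spec_get_power_of_game game out) := by unfold Spec_get_power_of_game; infer_instance

-- ===== CLAIM (what is proved, stated in full; the proofs are below) =====
def Claim_equal_get_power_of_game : Prop := ∀ (game : List (String × List (List (String × Int)))), Dom_get_power_of_game game → Pre_get_power_of_game game → Spec_get_power_of_game game (get_power_of_game game)

-- ===== LEMMAS AND PROOFS =====

-- the running maximum for one color over a pair list
def pvNeedFrom (c : String) (a : Int) : List (String × Int) → Int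
  | [] => a
  | p :: ps => pvNeedFrom c (if p.1 = c then max a p.2 else a) ps

theorem pv_foldl_max_filterMap (c : String) (ps : List (String × Int)) (a : Int) :
    (ps.filterMap (fun p => if p.1 = c then some p.2 else none)).foldl max a = pvNeedFrom c a ps := by
  induction ps generalizing a with
  | nil => rfl
  | cons p ps ih =>
    by_cases h : p.1 = c <;> simp [h, pvNeedFrom, ih]

theorem pv_foldl_foldl {α β : Type} (f : β → α → β) :
    ∀ (sets : List (List α)) (d : β),
      sets.foldl (fun d s => s.foldl f d) d = (sets.flatten).foldl f d := by
  intro sets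
  induction sets with
  | nil => intro d; rfl
  | cons s sets ih => intro d; simp [List.flatten, List.foldl_append, ih]

theorem pv_stepA_getD (d : PySem.Dict String Int) (p : String × Int) (t : String)
    (hc : d.contains p.1 = true) :
    (pvStepA d p).getD t 0 = if p.1 = t then max (d.getD p.1 0) p.2 else d.getD t 0 := by
  have hsome : (d.get? p.1).isSome := by
    rw [← PySem.Dict.contains_eq_isSome_get?]; exact hc
  obtain ⟨v, hv⟩ := Option.isSome_iff_exists.mp hsome
  have hgd : d.getD p.1 0 = v := by rw [PySem.Dict.getD_eq_get?_getD, hv]; rfl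
  unfold pvStepA
  rw [hv]
  by_cases hlt : v < p.2
  · simp only [if_pos hlt, PySem.Dict.getD_insert]
    by_cases h : p.1 = t
    · subst h; simp [hgd, max_eq_right (le_of_lt hlt)]
    · simp [h, Ne.symm h]
  · simp only [if_neg hlt]
    by_cases h : p.1 = t
    · subst h; rw [if_pos rfl, hgd, max_eq_left (not_lt.mp hlt)]
    · rw [if_neg h]

theorem pv_stepA_contains (d : PySem.Dict String Int) (p : String × Int) (t : String)
    (hc : d.contains t = true) : (pvStepA d p).contains t = true := by
  unfold pvStepA
  cases hg : d.get? p.1 with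
  | none => exact hc
  | some v =>
    by_cases hlt : v < p.2
    · simp [hlt, PySem.Dict.contains_insert, hc]
    · simpa [hlt]

theorem pv_fold_getD (ps : List (String × Int)) (t : String) (ht : t = "red" ∨ t = "green" ∨ t = "blue") :
    ∀ (d : PySem.Dict String Int),
      (∀ c, (c = "red" ∨ c = "green" ∨ c = "blue") → d.contains c = true) →
      (∀ p ∈ ps, p.1 = "red" ∨ p.1 = "green" ∨ p.1 = "blue") →
      (ps.foldl pvStepA d).getD t 0 = pvNeedFrom t (d.getD t 0) ps := by
  induction ps with
  | nil => intro d _ _; rfl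
  | cons p ps ih =>
    intro d hcont hcol
    have hp : p.1 = "red" ∨ p.1 = "green" ∨ p.1 = "blue" := hcol p (List.mem_cons_self ..)
    have hc : d.contains p.1 = true := hcont p.1 hp
    have hcont' : ∀ c, (c = "red" ∨ c = "green" ∨ c = "blue") → (pvStepA d p).contains c = true :=
      fun c hcm => pv_stepA_contains d p c (hcont c hcm)
    have hcol' : ∀ q ∈ ps, q.1 = "red" ∨ q.1 = "green" ∨ q.1 = "blue" :=
      fun q hq => hcol q (List.mem_cons_of_mem _ hq)
    simp only [List.foldl_cons, pvNeedFrom]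
    rw [ih (pvStepA d p) hcont' hcol', pv_stepA_getD d p t hc]
    by_cases h : p.1 = t
    · subst h; simp
    · simp [h]

theorem get_power_of_game_spec : Claim_equal_get_power_of_game := by
  intro game _hDom hPre
  unfold Spec_get_power_of_game get_power_of_game get_power_of_game_alt
  obtain ⟨hs, hcol⟩ := hPre
  obtain ⟨sets, hsets⟩ := Option.isSome_iff_exists.mp hs
  rw [hsets]
  simp only [hsets, Option.getD_some] at hcol
  dsimp only [Option.getD_some]
  have hcolf : ∀ p ∈ sets.flatten, p.1 = "red" ∨ p.1 = "green" ∨ p.1 = "blue" := by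
    intro p hp
    obtain ⟨s, hsmem, hpmem⟩ := List.mem_flatten.mp hp
    exact hcol s hsmem p hpmem
  have hinit : ∀ c, (c = "red" ∨ c = "green" ∨ c = "blue") →
      (PySem.Dict.ofList [("red", (0:Int)), ("green", 0), ("blue", 0)]).contains c = true := by
    intro c hc
    rcases hc with h | h | h <;> subst h <;> decide
  rw [pv_foldl_foldl]
  have hred := pv_fold_getD sets.flatten "red" (Or.inl rfl) _ hinit hcolf
  have hgreen := pv_fold_getD sets.flatten "green" (Or.inr (Or.inl rfl)) _ hinit hcolf
  have hblue := pv_fold_getD sets.flatten "blue" (Or.inr (Or.inr rfl)) _ hinit hcolf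
  simp only [List.flatMap_id]
  simp only [List.foldl_cons, pv_foldl_max_filterMap]
  have e1 : (PySem.Dict.ofList [("red", (0:Int)), ("green", 0), ("blue", 0)]).getD "red" 0 = 0 := by decide
  have e2 : (PySem.Dict.ofList [("red", (0:Int)), ("green", 0), ("blue", 0)]).getD "green" 0 = 0 := by decide
  have e3 : (PySem.Dict.ofList [("red", (0:Int)), ("green", 0), ("blue", 0)]).getD "blue" 0 = 0 := by decide
  rw [hred, hgreen, hblue, e1, e2, e3]
  simp
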